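-- pv_equiv track=rewrite | github.com/prtvi/word-search | main.py | normalizeYAndSort
-- ===== SOURCE A (Python) =====
-- def normalizeYAndSort(coordsLabels, cols):
--     '''Normalize (make all y co-ordinate values of the row the same) the y co-ordinates to a same value for the entire row and sort by Y first then by X'''
--
--     y_for_row = coordsLabels[0][1]
--     for i, cnt in enumerate(coordsLabels):
--         x, y, className = cnt
--
--         # if beginning of row (col 1) then change 'y_for_row' to y value at that position
--         if i % cols == 0:
--             y_for_row = y
--
--         # else make y as the set 'y_for_row' value
--         else:
--             y = y_for_row
--
--         # replace the tuple in the array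
--         coordsLabels[i] = (x, y, className)
--
--     # return sorted by Y first then by X
--     return sorted(
--         coordsLabels, key=lambda k: [k[1], k[0]])
-- ===== SOURCE B (Python) =====
-- def normalizeYAndSort(coordsLabels, cols):
--     '''Same result as A, built row-by-row: chunk the list into rows of |cols|
--     elements, give every element of a row the y of the row's first element,
--     then sort by y then x. (A mutates coordsLabels in place; B does not.)'''
--     step = abs(cols)
--     res = []
--     for start in range(0, len(coordsLabels), step):
--         row = coordsLabels[start:start + step]
--         y = row[0][1]
--         for x, _, c in row:
--             res.append((x, y, c))
--     return sorted(res, key=lambda k: [k[1], k[0]])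
-- ===== Notes on version B (the rewrite author's own statement) =====
-- stated objective: alternative
-- what changed: Replaces A's single stateful pass (a running y_for_row carried through the enumerate loop while mutating the list in place) by a stateless row-chunking pass: the list is cut into rows of |cols| elements, each row is rebuilt with the y of its first element, then the result is sorted by (y, x); B does not mutate its argument.
import Mathlib
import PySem

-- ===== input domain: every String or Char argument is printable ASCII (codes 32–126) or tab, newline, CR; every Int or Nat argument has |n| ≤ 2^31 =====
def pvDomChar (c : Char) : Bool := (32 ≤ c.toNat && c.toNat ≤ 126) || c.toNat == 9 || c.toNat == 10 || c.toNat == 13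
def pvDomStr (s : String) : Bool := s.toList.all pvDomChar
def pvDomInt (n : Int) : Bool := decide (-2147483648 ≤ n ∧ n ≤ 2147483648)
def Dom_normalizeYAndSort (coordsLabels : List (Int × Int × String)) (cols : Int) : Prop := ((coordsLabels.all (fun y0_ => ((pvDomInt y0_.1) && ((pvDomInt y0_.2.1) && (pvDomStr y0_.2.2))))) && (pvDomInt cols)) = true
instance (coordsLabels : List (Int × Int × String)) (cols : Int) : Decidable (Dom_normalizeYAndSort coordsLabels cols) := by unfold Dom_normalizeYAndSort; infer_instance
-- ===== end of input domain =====

-- B rebuilds the list row by row (rows of |cols| elements) instead of A's single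
-- stateful running-y pass; equivalence is about the RETURN value only: A mutates
-- coordsLabels in place, B does not.

-- ===== PORT A =====
def normalizeYAndSort (coordsLabels : List (Int × Int × String)) (cols : Int) : List (Int × Int × String) :=
  match PySem.List.pyGet? coordsLabels 0 with
  | none => []   -- coordsLabels[0] raises IndexError: excluded by Pre_
  | some h0 =>
    -- for i, cnt in enumerate(...): the running state is (y_for_row, mutated prefix)
    let st := (PySem.List.enumerate coordsLabels 0).foldl
      (fun (st : Int × List (Int × Int × String)) p =>
        if PySem.Int.mod p.1 cols == 0 then (p.2.2.1, st.2 ++ [(p.2.1, p.2.2.1, p.2.2.2)])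
        else (st.1, st.2 ++ [(p.2.1, st.1, p.2.2.2)]))
      (h0.2.1, [])
    PySem.List.sorted2 st.2 (fun k => k.2.1) (fun k => k.1)

-- ===== PORT B =====
def normalizeYAndSort_alt (coordsLabels : List (Int × Int × String)) (cols : Int) : List (Int × Int × String) :=
  let step := if cols < 0 then -cols else cols   -- abs(cols)
  let res := (PySem.List.pyRange 0 (coordsLabels.length : Int) step).foldl
    (fun acc st =>
      match PySem.List.slice coordsLabels (some st) (some (st + step)) with
      | [] => acc   -- row[0] would raise; unreachable: every range start is < len
      | r0 :: _ => acc ++ (PySem.List.slice coordsLabels (some st) (some (st + step))).map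
          (fun t => (t.1, r0.2.1, t.2.2))) []
  PySem.List.sorted2 res (fun k => k.2.1) (fun k => k.1)

-- ===== PRECONDITION & SPEC =====
-- A raises IndexError on an empty list and ZeroDivisionError when cols == 0; exactly those are excluded (B would return [] on an empty list).
def Pre_normalizeYAndSort (coordsLabels : List (Int × Int × String)) (cols : Int) : Prop :=
  coordsLabels ≠ [] ∧ cols ≠ 0
instance (coordsLabels : List (Int × Int × String)) (cols : Int) : Decidable (Pre_normalizeYAndSort coordsLabels cols) := by unfold Pre_normalizeYAndSort; infer_instance
def pvWitness_normalizeYAndSort : (List (Int × Int × String)) × Int := ([(1, 5, "a"), (0, 6, "b"), (2, 9, "c")], 2)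

def Spec_normalizeYAndSort (coordsLabels : List (Int × Int × String)) (cols : Int) (out : List (Int × Int × String)) : Prop := out = normalizeYAndSort_alt coordsLabels cols
instance (coordsLabels : List (Int × Int × String)) (cols : Int) (out : List (Int × Int × String)) : Decidable (Spec_normalizeYAndSort coordsLabels cols out) := by unfold Spec_normalizeYAndSort; infer_instance

-- ===== CLAIM (what is proved, stated in full; the proofs are below) =====
def Claim_equal_normalizeYAndSort : Prop := ∀ (coordsLabels : List (Int × Int × String)) (cols : Int), Dom_normalizeYAndSort coordsLabels cols → Pre_normalizeYAndSort coordsLabels cols → Spec_normalizeYAndSort coordsLabels cols (normalizeYAndSort coordsLabels cols)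

-- ===== LEMMAS AND PROOFS =====

-- the common row-normalised list: rows of s elements, each stamped with its head's y
def pvChunks (s : Nat) : List (Int × Int × String) → List (Int × Int × String)
  | [] => []
  | t :: rest =>
      (t :: rest.take (s - 1)).map (fun u => (u.1, t.2.1, u.2.2))
        ++ pvChunks s (rest.drop (s - 1))
termination_by l => l.length
decreasing_by simp only [List.length_drop, List.length_cons]; omega

lemma pvChunks_nil (s : Nat) : pvChunks s [] = [] := by rw [pvChunks.eq_def]

lemma pvChunks_cons (s : Nat) (t : Int × Int × String) (rest : List (Int × Int × String)) :
    pvChunks s (t :: rest)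
      = (t :: rest.take (s - 1)).map (fun u => (u.1, t.2.1, u.2.2))
        ++ pvChunks s (rest.drop (s - 1)) := by rw [pvChunks.eq_def]

-- A's loop body, named (definitionally equal to the lambda in the port)
def pvStepA (cols : Int) (st : Int × List (Int × Int × String)) (p : Int × (Int × Int × String)) :
    Int × List (Int × Int × String) :=
  if PySem.Int.mod p.1 cols == 0 then (p.2.2.1, st.2 ++ [(p.2.1, p.2.2.1, p.2.2.2)])
  else (st.1, st.2 ++ [(p.2.1, st.1, p.2.2.2)])

-- A's loop, with the accumulator peeled off
def pvPassA (cols : Int) : Int → List (Int × (Int × Int × String)) → List (Int × Int × String)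
  | _, [] => []
  | y, (i, t) :: rest =>
      if PySem.Int.mod i cols == 0 then (t.1, t.2.1, t.2.2) :: pvPassA cols t.2.1 rest
      else (t.1, y, t.2.2) :: pvPassA cols y rest

lemma pvFoldA_eq (cols : Int) (l : List (Int × (Int × Int × String))) (y : Int)
    (acc : List (Int × Int × String)) :
    (l.foldl (pvStepA cols) (y, acc)).2 = acc ++ pvPassA cols y l := by
  induction l generalizing y acc with
  | nil => simp [pvPassA]
  | cons p rest ih =>
      obtain ⟨i, t⟩ := p
      rw [List.foldl_cons]
      by_cases h : PySem.Int.mod i cols = 0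
      · rw [show pvStepA cols (y, acc) (i, t) = (t.2.1, acc ++ [(t.1, t.2.1, t.2.2)]) from by
          simp [pvStepA, h]]
        rw [ih]
        simp [pvPassA, h]
      · rw [show pvStepA cols (y, acc) (i, t) = (y, acc ++ [(t.1, y, t.2.2)]) from by
          simp [pvStepA, h]]
        rw [ih]
        simp [pvPassA, h]

lemma pvPassA_within (cols : Int) (y : Int) (l : List (Int × Int × String))
    (tail : List (Int × (Int × Int × String))) (start : Int)
    (h : ∀ i : Nat, i < l.length → ¬ PySem.Int.mod (start + i) cols = 0) :
    pvPassA cols y (PySem.List.enumerate l start ++ tail)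
      = l.map (fun u => (u.1, y, u.2.2)) ++ pvPassA cols y tail := by
  induction l generalizing start with
  | nil => simp [PySem.List.enumerate]
  | cons t rest ih =>
      rw [PySem.List.enumerate_cons]
      have h0 : ¬ PySem.Int.mod start cols = 0 := by
        have := h 0 (by simp); simpa using this
      simp only [List.cons_append, pvPassA, beq_iff_eq, if_neg h0]
      rw [ih (start + 1) (fun i hi => by
        have heq : start + 1 + (i : Int) = start + ((i + 1 : Nat) : Int) := by push_cast; ring
        rw [heq]
        exact h (i + 1) (by simpa using Nat.succ_lt_succ hi))]
      simp

lemma pvNotDvd_between (s : Nat) (start : Int) (hdvd : (s : Int) ∣ start)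
    (j : Nat) (hj0 : 0 < j) (hjs : j < s) : ¬ (s : Int) ∣ (start + j) := by
  intro hd
  have h1 : (s : Int) ∣ (j : Int) := (Int.dvd_add_right hdvd).mp hd
  have := Int.le_of_dvd (by exact_mod_cast hj0) h1
  omega

lemma pvPassA_chunks (cols : Int) (hc : cols ≠ 0) (l : List (Int × Int × String))
    (start : Int) (hstart : (cols.natAbs : Int) ∣ start) (y : Int) :
    pvPassA cols y (PySem.List.enumerate l start) = pvChunks cols.natAbs l := by
  generalize hn : l.length = n
  induction n using Nat.strong_induction_on generalizing l start y with
  | _ n ih =>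
  cases l with
  | nil => simp [pvPassA, pvChunks_nil, PySem.List.enumerate]
  | cons t rest =>
    have hs : 0 < cols.natAbs := Int.natAbs_pos.mpr hc
    have habs : ∀ a : Int, (PySem.Int.mod a cols = 0) ↔ ((cols.natAbs : Int) ∣ a) := by
      intro a
      rw [PySem.Int.mod_eq_zero_iff_dvd]
      exact ⟨fun h => Int.natAbs_dvd.mpr h, fun h => Int.natAbs_dvd.mp h⟩
    rw [PySem.List.enumerate_cons]
    have h0 : PySem.Int.mod start cols == 0 := by
      simp only [beq_iff_eq]; exact (habs start).mpr hstart
    have hsplit : rest = rest.take (cols.natAbs - 1) ++ rest.drop (cols.natAbs - 1) :=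
      (List.take_append_drop _ _).symm
    rw [show pvPassA cols y ((start, t) :: PySem.List.enumerate rest (start + 1))
          = (t.1, t.2.1, t.2.2) :: pvPassA cols t.2.1 (PySem.List.enumerate rest (start + 1)) from by
      simp [pvPassA, h0]]
    rw [show PySem.List.enumerate rest (start + 1)
          = PySem.List.enumerate (rest.take (cols.natAbs - 1)) (start + 1)
            ++ PySem.List.enumerate (rest.drop (cols.natAbs - 1))
                 (start + 1 + (rest.take (cols.natAbs - 1)).length) by
      conv_lhs => rw [hsplit]
      rw [PySem.List.enumerate_append]]
    rw [pvPassA_within cols t.2.1 _ _ _ (fun i hi => by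
      rw [habs]
      have hlen : (rest.take (cols.natAbs - 1)).length ≤ cols.natAbs - 1 := by
        simp [List.length_take]
      have hi' : i < cols.natAbs - 1 := lt_of_lt_of_le hi hlen
      have hnd := pvNotDvd_between cols.natAbs start hstart (1 + i) (by omega) (by omega)
      intro hd; apply hnd
      have heq : start + 1 + (i : Int) = start + ((1 + i : Nat) : Int) := by push_cast; ring
      rw [heq] at hd; exact hd)]
    rw [pvChunks_cons]
    simp only [List.map_cons, List.cons_append]
    congr 1
    by_cases hlen : cols.natAbs - 1 ≤ rest.length
    · have htl : (rest.take (cols.natAbs - 1)).length = cols.natAbs - 1 := by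
        simp [List.length_take]; omega
      rw [htl]
      have hstart' : (cols.natAbs : Int) ∣ (start + 1 + ((cols.natAbs - 1 : Nat) : Int)) := by
        have heq : start + 1 + ((cols.natAbs - 1 : Nat) : Int) = start + (cols.natAbs : Int) := by
          push_cast [Nat.cast_sub (by omega : 1 ≤ cols.natAbs)]; ring
        rw [heq]
        exact Dvd.dvd.add hstart dvd_rfl
      rw [ih (rest.drop (cols.natAbs - 1)).length (by simp at hn ⊢; omega) _ _ hstart' t.2.1 rfl]
    · have hdrop : rest.drop (cols.natAbs - 1) = [] :=
        List.drop_eq_nil_of_le (by omega)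
      rw [hdrop]
      simp [pvPassA, pvChunks_nil, PySem.List.enumerate]

lemma pvPyRange_pos_cons (a b s : Int) (hs : 0 < s) (hab : a < b) :
    PySem.List.pyRange a b s = a :: PySem.List.pyRange (a + s) b s := by
  rw [PySem.List.pyRange_of_pos a b hs, PySem.List.pyRange_of_pos (a + s) b hs]
  by_cases h2 : a + s < b
  · rw [if_pos hab, if_pos h2]
    have hcnt : ((b - a + s - 1) / s).toNat = ((b - (a + s) + s - 1) / s).toNat + 1 := by
      have he : b - a + s - 1 = (b - (a + s) + s - 1) + 1 * s := by ring
      rw [he, Int.add_mul_ediv_right _ _ (by omega : s ≠ 0)]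
      have hnn : 0 ≤ (b - (a + s) + s - 1) / s := Int.ediv_nonneg (by omega) (by omega)
      omega
    rw [hcnt, List.range_succ_eq_map]
    simp only [List.map_cons, List.map_map]
    congr 1
    · simp
    · apply List.map_congr_left
      intro k _
      simp [Function.comp]; ring
  · rw [if_pos hab, if_neg h2]
    have hcnt : ((b - a + s - 1) / s).toNat = 1 := by
      have h1 : (b - a + s - 1) / s = 1 := by
        have he : b - a + s - 1 = (b - a - 1) + 1 * s := by ring
        rw [he, Int.add_mul_ediv_right _ _ (by omega : s ≠ 0),
          Int.ediv_eq_zero_of_lt (by omega) (by omega)]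
        norm_num
      omega
    simp [hcnt, List.range_succ]

-- B's loop body, named (definitionally equal to the lambda in the port)
def pvStepB (cl : List (Int × Int × String)) (step : Int)
    (acc : List (Int × Int × String)) (st : Int) : List (Int × Int × String) :=
  match PySem.List.slice cl (some st) (some (st + step)) with
  | [] => acc
  | r0 :: _ => acc ++ (PySem.List.slice cl (some st) (some (st + step))).map
      (fun t => (t.1, r0.2.1, t.2.2))

lemma pvFoldB_eq (cl : List (Int × Int × String)) (s : Nat) (hs : 0 < s)
    (start : Nat) (acc : List (Int × Int × String)) :
    ((PySem.List.pyRange (start : Int) (cl.length : Int) (s : Int)).foldl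
        (pvStepB cl (s : Int)) acc)
      = acc ++ pvChunks s (cl.drop start) := by
  generalize hn : cl.length - start = n
  induction n using Nat.strong_induction_on generalizing start acc with
  | _ n ih =>
  by_cases hlt : start < cl.length
  · rw [pvPyRange_pos_cons _ _ _ (by exact_mod_cast hs) (by exact_mod_cast hlt)]
    rw [List.foldl_cons]
    have hrow : PySem.List.slice cl (some (start : Int)) (some ((start : Int) + (s : Int)))
        = (cl.drop start).take s := by
      exact_mod_cast PySem.List.slice_natCast_add cl start s
    obtain ⟨t, rest, hdd⟩ : ∃ t rest, cl.drop start = t :: rest := by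
      cases hd : cl.drop start with
      | nil =>
          exfalso
          have h1 := List.length_drop (l := cl) (i := start)
          rw [hd] at h1; simp at h1; omega
      | cons a b => exact ⟨a, b, rfl⟩
    obtain ⟨m, hm⟩ : ∃ m, s = m + 1 := ⟨s - 1, by omega⟩
    have hstep : pvStepB cl (s : Int) acc (start : Int)
        = acc ++ (t :: rest.take (s - 1)).map (fun u => (u.1, t.2.1, u.2.2)) := by
      rw [pvStepB, hrow, hdd, hm]
      simp [List.take_succ_cons]
    rw [hstep]
    have hcast : (start : Int) + (s : Int) = ((start + s : Nat) : Int) := by push_cast; ring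
    rw [hcast, ih (cl.length - (start + s)) (by omega) (start + s) _ rfl]
    have h1 : cl.drop (start + 1) = rest := by
      rw [← List.tail_drop, hdd]
      rfl
    have hdrop2 : cl.drop (start + s) = rest.drop (s - 1) := by
      rw [← h1, List.drop_drop]
      congr 1
      omega
    rw [hdrop2]
    conv_rhs => rw [hdd, pvChunks_cons]
    simp
  · rw [PySem.List.pyRange_of_pos _ _ (by exact_mod_cast hs : (0:Int) < (s:Int))]
    rw [if_neg (by exact_mod_cast hlt)]
    rw [List.drop_eq_nil_of_le (by omega)]
    simp [pvChunks_nil]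

lemma pvAbs_eq (cols : Int) : (if cols < 0 then -cols else cols) = (cols.natAbs : Int) := by
  rcases Int.lt_or_le cols 0 with h | h
  · rw [if_pos h, Int.natCast_natAbs, abs_of_neg h]
  · rw [if_neg (not_lt.mpr h), Int.natCast_natAbs, abs_of_nonneg h]

-- ===== VERDICT (by name: the statement is the Claim_ definition above) =====
theorem normalizeYAndSort_spec : Claim_equal_normalizeYAndSort := by
  intro cl cols _ hpre
  obtain ⟨hne, hc⟩ := hpre
  unfold Spec_normalizeYAndSort normalizeYAndSort normalizeYAndSort_alt
  cases cl with
  | nil => exact absurd rfl hne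
  | cons h0 tl =>
    have hget : PySem.List.pyGet? (h0 :: tl) (0 : Int) = some h0 := by
      simp [PySem.List.pyGet?, PySem.List.pyIdx?]
    rw [hget]
    simp only
    have hA := pvFoldA_eq cols (PySem.List.enumerate (h0 :: tl) 0) h0.2.1 []
    have hB := pvFoldB_eq (h0 :: tl) cols.natAbs (Int.natAbs_pos.mpr hc) 0 []
    rw [pvAbs_eq cols]
    congr 1
    calc ((PySem.List.enumerate (h0 :: tl) 0).foldl (pvStepA cols) (h0.2.1, [])).2
        = pvPassA cols h0.2.1 (PySem.List.enumerate (h0 :: tl) 0) := by rw [hA]; simp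
      _ = pvChunks cols.natAbs (h0 :: tl) := pvPassA_chunks cols hc _ 0 (dvd_zero _) _
      _ = (PySem.List.pyRange ((0:Nat) : Int) (((h0 :: tl).length : Nat) : Int) ((cols.natAbs : Nat) : Int)).foldl
            (pvStepB (h0 :: tl) (cols.natAbs : Int)) [] := by rw [hB]; simp
      _ = (PySem.List.pyRange 0 ((h0 :: tl).length : Int) (cols.natAbs : Int)).foldl
            (pvStepB (h0 :: tl) (cols.natAbs : Int)) [] := by norm_num
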